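-- pv_equiv track=rewrite | github.com/colmenaresw/quatum_project | Operators.py | index_map
-- ===== SOURCE A (Python) =====
-- def index_map(n_of_pro):
--     """
--         here we determine the index of every processor in the final solution
--         n_of_pro: how many columns each processor stores
--     """
--     map_of_indices = {}
--     for i in range(len(n_of_pro)):
--         if i == 0:
--             map_of_indices[i] = (i, n_of_pro[i]+1)
--         else:
--             map_of_indices[i] = (map_of_indices[i-1][1]-1, map_of_indices[i-1][1] + n_of_pro[i])
--     return map_of_indices
-- ===== SOURCE B (Python) =====
-- def index_map(n_of_pro):
--     """
--         here we determine the index of every processor in the final solution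
--         n_of_pro: how many columns each processor stores
--     """
--     return {i: (sum(n_of_pro[:i]), sum(n_of_pro[:i + 1]) + 1)
--             for i in range(len(n_of_pro))}
-- ===== Notes on version B (the rewrite author's own statement) =====
-- stated objective: simpler
-- what changed: B computes each entry independently from the closed form (sum(n_of_pro[:i]), sum(n_of_pro[:i+1])+1) with a fresh slice-sum per index, keeping no running state at all, instead of A's sequential recurrence off the previous dict entry with its i==0 special case; this trades A's O(n) single pass for an O(n^2) but stateless one-liner.
import Mathlib
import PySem

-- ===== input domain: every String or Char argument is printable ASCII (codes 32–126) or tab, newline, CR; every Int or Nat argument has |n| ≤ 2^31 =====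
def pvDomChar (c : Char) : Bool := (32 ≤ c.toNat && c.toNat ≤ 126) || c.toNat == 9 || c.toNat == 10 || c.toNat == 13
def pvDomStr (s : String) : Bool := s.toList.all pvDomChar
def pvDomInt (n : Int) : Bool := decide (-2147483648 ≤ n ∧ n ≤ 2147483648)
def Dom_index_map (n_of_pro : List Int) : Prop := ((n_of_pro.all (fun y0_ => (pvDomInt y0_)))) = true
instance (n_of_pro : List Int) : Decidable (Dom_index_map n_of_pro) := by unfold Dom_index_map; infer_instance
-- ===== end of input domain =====

-- B replaces A's sequential recurrence off the previous dict entry (with its i==0 special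
-- case) by a stateless per-index closed form summing a fresh slice; objective: simpler.

-- ===== PORT A =====
def index_map (n_of_pro : List Int) : List (Int × Int × Int) :=
  let d : PySem.Dict Int (Int × Int) :=
    (PySem.List.pyRange 0 n_of_pro.length 1).foldl (fun d i =>
      if i == 0 then
        d.insert i (i, PySem.List.pyGetD n_of_pro i 0 + 1)
      else
        match d.get? (i - 1) with
        | some p => d.insert i (p.2 - 1, p.2 + PySem.List.pyGetD n_of_pro i 0)
        | none => d)  -- unreachable: key i-1 is always present when i > 0
      PySem.Dict.empty
  d.items

-- ===== PORT B =====
def index_map_alt (n_of_pro : List Int) : List (Int × Int × Int) :=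
  (PySem.List.pyRange 0 n_of_pro.length 1).map (fun i =>
    (i, (PySem.List.slice n_of_pro none (some i)).sum,
        (PySem.List.slice n_of_pro none (some (i + 1))).sum + 1))

-- ===== PRECONDITION & SPEC =====
def Spec_index_map (n_of_pro : List Int) (out : List (Int × Int × Int)) : Prop := out = index_map_alt n_of_pro
instance (n_of_pro : List Int) (out : List (Int × Int × Int)) : Decidable (Spec_index_map n_of_pro out) := by unfold Spec_index_map; infer_instance

-- ===== CLAIM (what is proved, stated in full; the proofs are below) =====
def Claim_equal_index_map : Prop := ∀ (n_of_pro : List Int), Dom_index_map n_of_pro → Spec_index_map n_of_pro (index_map n_of_pro)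

-- ===== LEMMAS AND PROOFS =====

-- the common closed form: entry k is (k, S k, S (k+1) + 1) with S k = sum of the first k loads
def pvEntry (l : List Int) (k : Nat) : Int × Int × Int :=
  ((k : Int), (l.take k).sum, (l.take (k + 1)).sum + 1)

lemma b_eq (l : List Int) : index_map_alt l = (List.range l.length).map (pvEntry l) := by
  unfold index_map_alt
  rw [PySem.List.pyRange_zero_nat, List.map_map]
  apply List.map_congr_left
  intro k _
  simp only [Function.comp]
  have h1 : PySem.List.slice l none (some (k : Int)) = l.take k :=
    PySem.List.slice_to_natCast l k
  have h2 : PySem.List.slice l none (some ((k : Int) + 1)) = l.take (k + 1) := by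
    have : ((k : Int) + 1) = ((k + 1 : Nat) : Int) := by push_cast; ring
    rw [this]; exact PySem.List.slice_to_natCast l (k + 1)
  rw [h1, h2]; rfl

lemma dA_items (l : List Int) : ∀ n : Nat, n ≤ l.length →
    ((PySem.List.pyRange 0 n 1).foldl (fun d i =>
      if i == 0 then
        d.insert i (i, PySem.List.pyGetD l i 0 + 1)
      else
        match d.get? (i - 1) with
        | some p => d.insert i (p.2 - 1, p.2 + PySem.List.pyGetD l i 0)
        | none => d)
      (PySem.Dict.empty : PySem.Dict Int (Int × Int))).items
      = (List.range n).map (fun (k : Nat) => ((k : Int), ((l.take k).sum, (l.take (k + 1)).sum + 1))) := by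
  intro n
  induction n with
  | zero => intro _; rfl
  | succ m ih =>
    intro hle
    have hm := ih (Nat.le_of_succ_le hle)
    have hrange : PySem.List.pyRange 0 ((m+1 : Nat) : Int) 1 = PySem.List.pyRange 0 (m : Int) 1 ++ [(m : Int)] := by
      have h := PySem.List.pyRange_one_succ_right (a := 0) (b := (m : Int)) (by positivity)
      rw [← h]; norm_cast
    rw [hrange, List.foldl_append, List.foldl_cons, List.foldl_nil]
    have hd : ((PySem.List.pyRange 0 (m : Int) 1).foldl (fun d i =>
      if i == 0 then
        d.insert i (i, PySem.List.pyGetD l i 0 + 1)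
      else
        match d.get? (i - 1) with
        | some p => d.insert i (p.2 - 1, p.2 + PySem.List.pyGetD l i 0)
        | none => d)
      (PySem.Dict.empty : PySem.Dict Int (Int × Int)))
        = PySem.Dict.mk ((List.range m).map (fun (k : Nat) => ((k : Int), ((l.take k).sum, (l.take (k + 1)).sum + 1)))) := by
      apply PySem.Dict.ext
      exact hm
    rw [hd]
    have htake : (l.take (m + 1)).sum = (l.take m).sum + l.getD m 0 := by
      have hml : m < l.length := hle
      have h1 : List.take (m+1) l = List.take m l ++ [l[m]] := by
        rw [List.take_add_one, List.getElem?_eq_getElem hml]; rfl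
      have h2 : l.getD m 0 = l[m] := by
        rw [List.getD_eq_getElem?_getD, List.getElem?_eq_getElem hml]; rfl
      rw [h1, h2, List.sum_append, List.sum_cons, List.sum_nil, add_zero]
    have hnodup : (PySem.Dict.mk ((List.range m).map (fun (k : Nat) => ((k : Int), ((l.take k).sum, (l.take (k + 1)).sum + 1)))) : PySem.Dict Int (Int × Int)).keys.Nodup := by
      simp only [PySem.Dict.keys_mk, List.map_map]
      have : ((fun p => p.1) ∘ (fun (k : Nat) => ((k : Int), ((l.take k).sum, (l.take (k + 1)).sum + 1)))) = (fun (k : Nat) => (k : Int)) := rfl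
      rw [this]
      exact (List.nodup_range).map (fun a b => by exact_mod_cast id)
    cases m with
    | zero =>
      cases l with
      | nil => simp at hle
      | cons x xs =>
        simp only [List.range_zero, List.map_nil, Nat.cast_zero, beq_self_eq_true, if_true]
        rw [PySem.Dict.items_insert_of_not_contains]
        · simp [List.range_succ, PySem.List.pyGetD_zero_cons]
        · rfl
    | succ j =>
      rw [if_neg (by intro h; simp at h; omega)]
      have hcast : ((↑(j+1) : Int) - 1) = ((j : Nat) : Int) := by push_cast; ring
      have hmem : (((j : Nat) : Int), ((l.take j).sum, (l.take (j+1)).sum + 1)) ∈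
          (PySem.Dict.mk ((List.range (j+1)).map (fun (k : Nat) => ((k : Int), ((l.take k).sum, (l.take (k + 1)).sum + 1)))) : PySem.Dict Int (Int × Int)).items := by
        simp only [PySem.Dict.items]
        exact List.mem_map.mpr ⟨j, List.mem_range.mpr (Nat.lt_succ_self j), rfl⟩
      have hget := PySem.Dict.get?_of_mem_items _ hmem hnodup
      rw [hcast, hget]
      have hnc : (PySem.Dict.mk ((List.range (j+1)).map (fun (k : Nat) => ((k : Int), ((l.take k).sum, (l.take (k + 1)).sum + 1)))) : PySem.Dict Int (Int × Int)).contains ((j+1 : Nat) : Int) = false := by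
        rw [PySem.Dict.contains_eq_decide_mem_keys]
        simp only [PySem.Dict.keys, PySem.Dict.items, List.map_map, Function.comp_def,
          decide_eq_false_iff_not, List.mem_map, List.mem_range]
        rintro ⟨k, hk, hk2⟩
        have : k = j + 1 := by exact_mod_cast hk2
        omega
      rw [PySem.Dict.items_insert_of_not_contains]
      · have hr : List.range (j+1+1) = List.range (j+1) ++ [j+1] := List.range_succ
        rw [hr, List.map_append, List.range_succ, List.map_append]
        congr 1
        simp only [List.map_cons, List.map_nil, PySem.List.pyGetD_natCast]
        rw [htake]
        norm_num
        ring
      · exact hnc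

lemma a_eq (l : List Int) : index_map l = (List.range l.length).map (pvEntry l) := by
  unfold index_map
  rw [dA_items l l.length le_rfl]
  rfl

-- ===== VERDICT (by name: the statement is the Claim_ definition above) =====
theorem index_map_spec : Claim_equal_index_map := by
  intro l _
  unfold Spec_index_map
  rw [a_eq, b_eq]
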